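-- pv_equiv track=rewrite | github.com/karthiKN-sk/grootan_ai_task | src/cv/Vehicle_Turn_Pipeline.py | _get_turn_statistics
-- ===== SOURCE A (Python) =====
-- from typing import Optional, Dict, Any
--
-- def _get_turn_statistics(vehicle_turns: Dict[int, str]) -> Dict[str, int]:
--     return {
--         "total": len(vehicle_turns),
--         "right_turn": sum(1 for t in vehicle_turns.values() if t == "right_turn"),
--         "left_turn": sum(1 for t in vehicle_turns.values() if t == "left_turn"),
--         "u_turn": sum(1 for t in vehicle_turns.values() if t == "u_turn"),
--         "straight": sum(1 for t in vehicle_turns.values() if t == "straight"),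
--     }
-- ===== SOURCE B (Python) =====
-- def _get_turn_statistics(vehicle_turns):
--     # One pass over the values with five explicit counters (no len(), no re-scans).
--     total = right = left = u = straight = 0
--     for t in vehicle_turns.values():
--         total += 1
--         if t == "right_turn":
--             right += 1
--         elif t == "left_turn":
--             left += 1
--         elif t == "u_turn":
--             u += 1
--         elif t == "straight":
--             straight += 1
--     return {
--         "total": total,
--         "right_turn": right,
--         "left_turn": left,
--         "u_turn": u,
--         "straight": straight,
--     }
-- ===== Notes on version B (the rewrite author's own statement) =====
-- stated objective: alternative
-- what changed: B makes a single pass over the values maintaining five explicit counters (total counted in the same loop instead of len()), replacing A's dict-comprehension with four separate generator scans.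
import Mathlib
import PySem

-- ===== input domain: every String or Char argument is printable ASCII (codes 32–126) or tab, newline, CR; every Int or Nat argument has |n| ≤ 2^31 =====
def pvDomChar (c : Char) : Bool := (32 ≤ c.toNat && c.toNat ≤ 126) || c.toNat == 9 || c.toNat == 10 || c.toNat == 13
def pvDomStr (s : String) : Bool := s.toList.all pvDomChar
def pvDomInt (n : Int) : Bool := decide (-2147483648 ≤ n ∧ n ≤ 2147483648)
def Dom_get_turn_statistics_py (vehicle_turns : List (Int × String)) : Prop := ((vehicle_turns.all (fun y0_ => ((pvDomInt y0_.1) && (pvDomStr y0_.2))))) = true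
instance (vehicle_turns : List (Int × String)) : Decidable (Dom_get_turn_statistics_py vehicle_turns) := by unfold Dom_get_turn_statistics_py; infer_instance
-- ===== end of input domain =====

-- B replaces A's four separate value scans (plus len()) by one pass with five explicit counters (alternative decomposition; same cost class).

-- ===== PORT A =====
-- each 'sum(1 for t in values if t == lbl)' is a fold adding 1 on the matching label
def get_turn_statistics_py (vehicle_turns : List (Int × String)) : List (String × Int) :=
  let d := PySem.Dict.ofList vehicle_turns
  let vals := d.values
  [ ("total", (d.size : Int)),
    ("right_turn", vals.foldl (fun a t => if t == "right_turn" then a + 1 else a) 0),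
    ("left_turn",  vals.foldl (fun a t => if t == "left_turn"  then a + 1 else a) 0),
    ("u_turn",     vals.foldl (fun a t => if t == "u_turn"     then a + 1 else a) 0),
    ("straight",   vals.foldl (fun a t => if t == "straight"   then a + 1 else a) 0) ]

-- ===== PORT B =====
-- Source B's single loop: one fold over the values carrying the five counters (total, right, left, u, straight)
def get_turn_statistics_py_alt (vehicle_turns : List (Int × String)) : List (String × Int) :=
  let d := PySem.Dict.ofList vehicle_turns
  let st := d.values.foldl
    (fun (st : Int × Int × Int × Int × Int) t =>
      if t == "right_turn" then (st.1 + 1, st.2.1 + 1, st.2.2.1, st.2.2.2.1, st.2.2.2.2)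
      else if t == "left_turn" then (st.1 + 1, st.2.1, st.2.2.1 + 1, st.2.2.2.1, st.2.2.2.2)
      else if t == "u_turn" then (st.1 + 1, st.2.1, st.2.2.1, st.2.2.2.1 + 1, st.2.2.2.2)
      else if t == "straight" then (st.1 + 1, st.2.1, st.2.2.1, st.2.2.2.1, st.2.2.2.2 + 1)
      else (st.1 + 1, st.2.1, st.2.2.1, st.2.2.2.1, st.2.2.2.2))
    (0, 0, 0, 0, 0)
  [ ("total", st.1), ("right_turn", st.2.1), ("left_turn", st.2.2.1),
    ("u_turn", st.2.2.2.1), ("straight", st.2.2.2.2) ]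

-- ===== PRECONDITION & SPEC =====
def Spec_get_turn_statistics_py (vehicle_turns : List (Int × String)) (out : List (String × Int)) : Prop := out = get_turn_statistics_py_alt vehicle_turns
instance (vehicle_turns : List (Int × String)) (out : List (String × Int)) : Decidable (Spec_get_turn_statistics_py vehicle_turns out) := by unfold Spec_get_turn_statistics_py; infer_instance

-- ===== CLAIM (what is proved, stated in full; the proofs are below) =====
def Claim_equal_get_turn_statistics_py : Prop := ∀ (vehicle_turns : List (Int × String)), Dom_get_turn_statistics_py vehicle_turns → Spec_get_turn_statistics_py vehicle_turns (get_turn_statistics_py vehicle_turns)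

-- ===== LEMMAS AND PROOFS =====
theorem foldl_if_count (s : String) (l : List String) (a : Int) :
    l.foldl (fun a t => if t == s then a + 1 else a) a = a + l.count s := by
  induction l generalizing a with
  | nil => simp
  | cons h tl ih =>
    simp only [List.foldl_cons, List.count_cons, ih]
    by_cases hc : h == s
    · simp [hc]; ring
    · simp [hc]

-- invariant of B's single fold: each component accumulates length / the label counts
theorem alt_fold_inv (l : List String) (a b c d e : Int) :
    l.foldl
      (fun (st : Int × Int × Int × Int × Int) t =>
        if t == "right_turn" then (st.1 + 1, st.2.1 + 1, st.2.2.1, st.2.2.2.1, st.2.2.2.2)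
        else if t == "left_turn" then (st.1 + 1, st.2.1, st.2.2.1 + 1, st.2.2.2.1, st.2.2.2.2)
        else if t == "u_turn" then (st.1 + 1, st.2.1, st.2.2.1, st.2.2.2.1 + 1, st.2.2.2.2)
        else if t == "straight" then (st.1 + 1, st.2.1, st.2.2.1, st.2.2.2.1, st.2.2.2.2 + 1)
        else (st.1 + 1, st.2.1, st.2.2.1, st.2.2.2.1, st.2.2.2.2))
      (a, b, c, d, e)
    = (a + l.length, b + l.count "right_turn", c + l.count "left_turn",
       d + l.count "u_turn", e + l.count "straight") := by
  induction l generalizing a b c d e with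
  | nil => simp
  | cons h tl ih =>
    simp only [List.foldl_cons, List.count_cons, List.length_cons]
    split_ifs with hr hl hu hs <;>
      simp only [ih, Prod.mk.injEq] <;> push_cast <;>
      first
        | omega
        | (exfalso; simp_all)

-- ===== VERDICT (by name: the statement is the Claim_ definition above) =====
theorem get_turn_statistics_py_spec : Claim_equal_get_turn_statistics_py := by
  intro vt _
  show get_turn_statistics_py vt = get_turn_statistics_py_alt vt
  simp only [get_turn_statistics_py, get_turn_statistics_py_alt, alt_fold_inv, foldl_if_count]
  simp [PySem.Dict.size, PySem.Dict.values]
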